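-- pv_equiv track=rewrite | github.com/OasisLMF/ODS_OpenExposureData | src/oed/schema.py | column_to_field
-- ===== SOURCE A (Python) =====
-- def column_to_field(columns: list, oed_fields: dict, use_generic_flexi=True):
--     """
--     Args:
--         columns: name of the columns in oed file
--         oed_fields: dict of all the field in ods_schema
--         use_generic_flexi: if true flexi column return the oed_schema name
--                                   if false flexi column are just lower cased
--     Return:
--         dict mapping between exact oed column name and field name in oed_schema
--     """
--     # support for name different from standard oed column name
--     aliases = {field_info.get('alias').lower(): field_name for field_name, field_info in oed_fields.items() if field_info.get('alias')}
--     result = {}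
--     for column in columns:
--         if column.lower() in oed_fields:
--             result[column] = column.lower()
--         elif column.lower() in aliases:
--             result[column] = aliases[column.lower()]
--         else:
--             for field_suffix in ['xx', 'zzz']:
--                 for i in range(1, len(column)):
--                     field_name = column.lower()[:-i] + field_suffix
--                     if field_name in oed_fields:
--                         if use_generic_flexi:
--                             result[column] = field_name
--                         else:
--                             result[column] = column.lower()
--                         break
--                 else:
--                     continue
--                 break
--             else:
--                 pass # unrecognized/unknown columns are not added
--     return result
-- ===== SOURCE B (Python) =====
-- def column_to_field(columns: list, oed_fields: dict, use_generic_flexi=True):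
--     # One pass over the schema builds the alias map and, per flexi suffix, the set of
--     # stems (field name minus 'xx'/'zzz'); each column then takes its longest matching
--     # stem by scanning the stem sets instead of testing every truncation of the column.
--     aliases = {}
--     xx_stems = set()
--     zzz_stems = set()
--     for field_name, field_info in oed_fields.items():
--         alias = field_info.get('alias')
--         if alias:
--             aliases[alias.lower()] = field_name
--         if field_name.endswith('xx'):
--             xx_stems.add(field_name[:-2])
--         if field_name.endswith('zzz'):
--             zzz_stems.add(field_name[:-3])
--     result = {}
--     for column in columns:
--         low = column.lower()
--         if low in oed_fields:
--             result[column] = low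
--         elif low in aliases:
--             result[column] = aliases[low]
--         else:
--             stem = max((s for s in xx_stems if 0 < len(s) < len(low) and low.startswith(s)),
--                        key=len, default=None)
--             suffix = 'xx'
--             if stem is None:
--                 stem = max((s for s in zzz_stems if 0 < len(s) < len(low) and low.startswith(s)),
--                            key=len, default=None)
--                 suffix = 'zzz'
--             if stem is not None:
--                 result[column] = stem + suffix if use_generic_flexi else low
--     return result
-- ===== Notes on version B (the rewrite author's own statement) =====
-- stated objective: alternative
-- what changed: Instead of testing every truncation of every column against the whole schema dict (per suffix), B precomputes in one pass over the schema the set of stems of fields ending in 'xx'/'zzz' and maps each unmatched column to its longest stem that is a proper prefix of the lower-cased column.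
import Mathlib
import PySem

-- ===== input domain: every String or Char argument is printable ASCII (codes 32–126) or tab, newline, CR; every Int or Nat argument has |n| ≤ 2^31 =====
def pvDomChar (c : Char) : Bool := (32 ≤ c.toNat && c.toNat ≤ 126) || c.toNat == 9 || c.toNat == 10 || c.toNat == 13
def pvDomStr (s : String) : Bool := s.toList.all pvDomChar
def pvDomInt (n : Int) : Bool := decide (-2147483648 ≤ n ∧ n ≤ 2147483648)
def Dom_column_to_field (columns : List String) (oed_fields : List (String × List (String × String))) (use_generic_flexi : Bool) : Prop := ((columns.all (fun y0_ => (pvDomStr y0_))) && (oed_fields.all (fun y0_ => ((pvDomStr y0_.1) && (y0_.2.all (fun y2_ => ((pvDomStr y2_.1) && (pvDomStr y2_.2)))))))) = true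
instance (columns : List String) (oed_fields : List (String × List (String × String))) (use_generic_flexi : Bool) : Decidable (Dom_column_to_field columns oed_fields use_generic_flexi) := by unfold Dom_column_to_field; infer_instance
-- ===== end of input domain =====

-- B replaces A's per-column scan over every truncation of the column (each tested against
-- the whole schema) by per-suffix stem sets precomputed in one pass over the schema and a
-- longest-matching-stem lookup per column; objective: alternative algorithm, same results.


-- ===== PORT A =====
-- aliases = {field_info.get('alias').lower(): field_name for … if field_info.get('alias')}
def pvA_aliases (oed_fields : List (String × List (String × String))) : PySem.Dict String String :=
  oed_fields.foldl (fun d p =>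
    match (PySem.Dict.mk p.2).get? "alias" with
    | some a => if a = "" then d else d.insert (PySem.Str.lower a) p.1
    | none => d) PySem.Dict.empty

-- 'for field_suffix in ['xx','zzz']: for i in range(1, len(column)): … break' as a
-- first-success search returning the matched field_name
def pvA_flexi (keys : List String) (column : String) : Option String :=
  ["xx", "zzz"].findSome? (fun suf =>
    (PySem.List.pyRange 1 (PySem.Str.len column)).findSome? (fun i =>
      if keys.contains (PySem.Str.slice (PySem.Str.lower column) none (some (-i)) ++ suf) then
        some (PySem.Str.slice (PySem.Str.lower column) none (some (-i)) ++ suf) else none))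

def column_to_field (columns : List String) (oed_fields : List (String × List (String × String))) (use_generic_flexi : Bool) : List (String × String) :=
  let aliases := pvA_aliases oed_fields
  (columns.foldl (fun (result : PySem.Dict String String) column =>
    let low := PySem.Str.lower column
    if (oed_fields.map Prod.fst).contains low then result.insert column low
    else match aliases.get? low with
    | some f => result.insert column f
    | none =>
      match pvA_flexi (oed_fields.map Prod.fst) column with
      | some field_name => result.insert column (if use_generic_flexi then field_name else low)
      | none => result) PySem.Dict.empty).items

-- ===== PORT B =====
-- one pass over the schema: the alias map plus, per flexi suffix, the set of stems
def pvB_prep (oed_fields : List (String × List (String × String))) :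
    PySem.Dict String String × PySem.Set String × PySem.Set String :=
  oed_fields.foldl (fun acc p =>
    ((match (PySem.Dict.mk p.2).get? "alias" with
      | some a => if a = "" then acc.1 else acc.1.insert (PySem.Str.lower a) p.1
      | none => acc.1),
     (if PySem.Str.endswith p.1 "xx" then PySem.Set.add acc.2.1 (PySem.Str.slice p.1 none (some (-2))) else acc.2.1),
     (if PySem.Str.endswith p.1 "zzz" then PySem.Set.add acc.2.2 (PySem.Str.slice p.1 none (some (-3))) else acc.2.2)))
    (PySem.Dict.empty, [], [])

-- max((s for s in stems if 0 < len(s) < len(low) and low.startswith(s)), key=len, default=None)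
def pvB_best (stems : PySem.Set String) (low : String) : Option String :=
  PySem.List.max? (stems.filter (fun s =>
      0 < PySem.Str.len s && PySem.Str.len s < PySem.Str.len low && PySem.Str.startswith low s))
    (fun s => PySem.Str.len s)

def column_to_field_alt (columns : List String) (oed_fields : List (String × List (String × String))) (use_generic_flexi : Bool) : List (String × String) :=
  let (aliases, xx_stems, zzz_stems) := pvB_prep oed_fields
  (columns.foldl (fun (result : PySem.Dict String String) column =>
    let low := PySem.Str.lower column
    if (oed_fields.map Prod.fst).contains low then result.insert column low
    else match aliases.get? low with
    | some f => result.insert column f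
    | none =>
      match (match pvB_best xx_stems low with
             | some s => some (s ++ "xx")
             | none => (pvB_best zzz_stems low).map (· ++ "zzz")) with
      | some field_name => result.insert column (if use_generic_flexi then field_name else low)
      | none => result) PySem.Dict.empty).items

-- ===== PRECONDITION & SPEC =====
def Spec_column_to_field (columns : List String) (oed_fields : List (String × List (String × String))) (use_generic_flexi : Bool) (out : List (String × String)) : Prop := out = column_to_field_alt columns oed_fields use_generic_flexi
instance (columns : List String) (oed_fields : List (String × List (String × String))) (use_generic_flexi : Bool) (out : List (String × String)) : Decidable (Spec_column_to_field columns oed_fields use_generic_flexi out) := by unfold Spec_column_to_field; infer_instance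

-- ===== CLAIM (what is proved, stated in full; the proofs are below) =====
def Claim_equal_column_to_field : Prop := ∀ (columns : List String) (oed_fields : List (String × List (String × String))) (use_generic_flexi : Bool), Dom_column_to_field columns oed_fields use_generic_flexi → Spec_column_to_field columns oed_fields use_generic_flexi (column_to_field columns oed_fields use_generic_flexi)

-- ===== LEMMAS AND PROOFS =====

-- proof-side names: the candidate field name of prefix length l, the hit test, and the
-- ascending list of prefix lengths that hit, for one suffix
def pvPname (low suf : String) (l : Nat) : String := String.ofList (low.toList.take l ++ suf.toList)
def pvQ (keys : List String) (low suf : String) (l : Nat) : Bool := keys.contains (pvPname low suf l)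
def pvF (keys : List String) (low suf : String) (n : Nat) : List Nat :=
  (List.range' 1 (n - 1)).filter (pvQ keys low suf)
def pvStemList (keys : List String) (suf : String) (mi : Int) : List String :=
  (keys.filter (fun k => PySem.Str.endswith k suf)).map
    (fun k => PySem.Str.slice k none (some (-mi)))

theorem pv_findSome?_filter_head {α : Type} (l : List Nat) (p : Nat → Bool) (f : Nat → α) :
    l.findSome? (fun x => if p x then some (f x) else none) = ((l.filter p).head?).map f := by
  induction l with
  | nil => rfl
  | cons x t ih => by_cases h : p x <;> simp [h, ih]

theorem pv_findSome?_congr {α β : Type} (l : List α) {f g : α → Option β}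
    (h : ∀ x ∈ l, f x = g x) : l.findSome? f = l.findSome? g := by
  induction l with
  | nil => rfl
  | cons x t ih =>
    simp only [List.findSome?_cons, h x (by simp)]
    cases g x with
    | some b => rfl
    | none => exact ih (fun y hy => h y (by simp [hy]))

theorem pv_slice_neg (cs : List Char) (m : Nat) (hm : 0 < m) :
    PySem.List.slice cs none (some (-(m : Int))) = cs.take (cs.length - m) := by
  simp only [PySem.List.slice, PySem.List.clampIdx]
  split_ifs with h1 h2 <;> [skip; skip; omega] <;> congr 1 <;> omega

theorem pv_pyRange_nil (a b : Int) (h : b ≤ a) : PySem.List.pyRange a b = [] := by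
  apply List.eq_nil_iff_forall_not_mem.mpr
  intro x hx
  have := PySem.List.mem_pyRange_one.mp hx
  omega

theorem pv_pyRange_natCast (a b : Nat) :
    PySem.List.pyRange (a : Int) (b : Int) = (List.range' a (b - a)).map (Nat.cast : Nat → Int) := by
  induction hd : b - a generalizing a with
  | zero =>
    rw [pv_pyRange_nil _ _ (by omega)]
    simp
  | succ d ih =>
    have ha : (a : Int) < (b : Int) := by exact_mod_cast (by omega : a < b)
    rw [PySem.List.pyRange_one_cons ha, List.range'_succ]
    have hcast : ((a : Int) + 1) = ((a + 1 : Nat) : Int) := by push_cast; ring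
    rw [hcast, ih (a + 1) (by omega)]
    simp

theorem pv_map_sub_reverse (k : Nat) :
    (List.range' 1 k).map (fun j => (k + 1) - j) = (List.range' 1 k).reverse := by
  rw [List.reverse_range', List.range'_eq_map_range, List.map_map]
  apply List.map_congr_left
  intro i hi
  simp at hi ⊢
  omega

-- A's inner scan over the truncations of one column, for one suffix: the first hit while
-- i ascends is the longest hitting prefix, i.e. the last element of pvF
theorem pv_A_side (keys : List String) (column suf : String) :
    ((PySem.List.pyRange 1 (PySem.Str.len column)).findSome? (fun i =>
        if keys.contains (PySem.Str.slice (PySem.Str.lower column) none (some (-i)) ++ suf) then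
          some (PySem.Str.slice (PySem.Str.lower column) none (some (-i)) ++ suf) else none))
    = ((pvF keys (PySem.Str.lower column) suf column.toList.length).getLast?).map
        (pvPname (PySem.Str.lower column) suf) := by
  set low := PySem.Str.lower column with hlowdef
  set n := column.toList.length with hndef
  have hlen : low.toList.length = n := by
    rw [hlowdef, PySem.Str.toList_lower]
    simp only [PySem.Chars.lower, List.length_map]
    rfl
  have hlenc : PySem.Str.len column = (n : Int) := by
    rw [PySem.Str.len_eq]
  rw [hlenc]
  rcases Nat.eq_zero_or_pos n with h0 | hpos
  · rw [h0, Nat.cast_zero, pv_pyRange_nil 1 0 (by norm_num)]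
    simp [pvF]
  · have hrange : PySem.List.pyRange 1 ((n : Int)) = List.map (Nat.cast : Nat → Int) (List.range' 1 (n-1)) := by
      have h := pv_pyRange_natCast 1 n
      simp only [Nat.cast_one] at h
      exact h
    rw [hrange, List.findSome?_map]
    simp only [Function.comp_def]
    have hname : ∀ j : Nat, 1 ≤ j →
        PySem.Str.slice low none (some (-(j : Int))) ++ suf = pvPname low suf (n - j) := by
      intro j hj
      apply String.toList_inj.mp
      rw [String.toList_append, PySem.Str.toList_slice, PySem.Chars.slice_eq_listSlice,
          pv_slice_neg _ j hj, hlen, pvPname, String.toList_ofList]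
    have hcong : ∀ j ∈ List.range' 1 (n-1),
        (if keys.contains (PySem.Str.slice low none (some (-((j:Nat):Int))) ++ suf) then
          some (PySem.Str.slice low none (some (-((j:Nat):Int))) ++ suf) else none)
        = (if pvQ keys low suf (n - j) then some (pvPname low suf (n - j)) else none) := by
      intro j hj
      rw [hname j (List.mem_range'_1.mp hj).1]
      rfl
    rw [pv_findSome?_congr _ hcong]
    rw [pv_findSome?_filter_head]
    set G := (List.range' 1 (n-1)).filter (fun j => pvQ keys low suf (n - j)) with hGdef
    have hGF : G.map (fun j => n - j) = (pvF keys low suf n).reverse := by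
      rw [pvF, ← List.filter_reverse, ← pv_map_sub_reverse (n-1)]
      rw [List.filter_map]
      have hn1 : n - 1 + 1 = n := by omega
      rw [hn1]
      rfl
    cases hG : G.head? with
    | none =>
      have hGnil : G = [] := List.head?_eq_none_iff.mp hG
      have : (pvF keys low suf n).reverse = [] := by rw [← hGF, hGnil]; rfl
      have hFnil : pvF keys low suf n = [] := List.reverse_eq_nil_iff.mp this
      simp [hFnil]
    | some j0 =>
      have hlast : (pvF keys low suf n).getLast? = some (n - j0) := by
        rw [← List.head?_reverse, ← hGF, List.head?_map, hG]
        rfl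
      simp [hlast]

-- membership in the stem set = the stem completed with the suffix is a schema key
theorem pv_stem_mem (keys : List String) (suf : String) (m : Nat)
    (hsuf : suf.toList.length = m) (hm : 0 < m) (s : String) :
    s ∈ PySem.Set.ofList (pvStemList keys suf (m : Int)) ↔
      String.ofList (s.toList ++ suf.toList) ∈ keys := by
  rw [PySem.Set.mem_ofList, pvStemList]
  simp only [List.mem_map, List.mem_filter]
  constructor
  · rintro ⟨k, ⟨hk, he⟩, rfl⟩
    have hsfx : suf.toList <:+ k.toList := by
      rw [PySem.Str.endswith_eq] at he
      exact List.isSuffixOf_iff_suffix.mp he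
    obtain ⟨t, ht⟩ := hsfx
    have hslice : (PySem.Str.slice k none (some (-(m : Int)))).toList = t := by
      rw [PySem.Str.toList_slice, PySem.Chars.slice_eq_listSlice, pv_slice_neg _ m hm, ← ht]
      simp [hsuf]
    have hkeq : String.ofList ((PySem.Str.slice k none (some (-(m : Int)))).toList ++ suf.toList) = k := by
      apply String.toList_inj.mp
      rw [String.toList_ofList, hslice, ht]
    rw [hkeq]
    exact hk
  · intro hk
    refine ⟨String.ofList (s.toList ++ suf.toList), ⟨hk, ?_⟩, ?_⟩
    · rw [PySem.Str.endswith_eq]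
      apply List.isSuffixOf_iff_suffix.mpr
      rw [String.toList_ofList]
      exact List.suffix_append _ _
    · apply String.toList_inj.mp
      rw [PySem.Str.toList_slice, PySem.Chars.slice_eq_listSlice, pv_slice_neg _ m hm, String.toList_ofList]
      simp [hsuf]

-- the first maximum by length of a candidate list indexed by pvF is the last element of pvF
theorem pv_max_char (cand : List String) (low suf : String) (F : List Nat)
    (hmem : ∀ s, s ∈ cand ↔ ∃ l, l ∈ F ∧ s = String.ofList (low.toList.take l))
    (hFsort : F.Pairwise (· < ·))
    (hFle : ∀ l ∈ F, l ≤ low.toList.length) :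
    (PySem.List.max? cand (fun s => PySem.Str.len s)).map (· ++ suf)
    = F.getLast?.map (pvPname low suf) := by
  have hlen : ∀ l, l ≤ low.toList.length → PySem.Str.len (String.ofList (low.toList.take l)) = (l : Int) := by
    intro l hl
    rw [PySem.Str.len_eq, String.toList_ofList, List.length_take]
    rw [min_eq_left hl]
  cases hL : F.getLast? with
  | none =>
    have hFnil : F = [] := List.getLast?_eq_none_iff.mp hL
    have hcnil : cand = [] := by
      apply List.eq_nil_iff_forall_not_mem.mpr
      intro s hs
      obtain ⟨l, hlF, _⟩ := (hmem s).mp hs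
      rw [hFnil] at hlF
      exact absurd hlF List.not_mem_nil
    rw [(PySem.List.max?_eq_none_iff _ _).mpr hcnil]
    rfl
  | some L =>
    obtain ⟨as, hAs⟩ := List.getLast?_eq_some_iff.mp hL
    have hLF : L ∈ F := by rw [hAs]; simp
    have hmax : ∀ x ∈ F, x ≤ L := by
      intro x hx
      rw [hAs] at hx hFsort
      rcases List.mem_append.mp hx with h | h
      · exact le_of_lt ((List.pairwise_append.mp hFsort).2.2 x h L (by simp))
      · simp at h; omega
    have hcmem : String.ofList (low.toList.take L) ∈ cand := (hmem _).mpr ⟨L, hLF, rfl⟩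
    cases hmx : PySem.List.max? cand (fun s => PySem.Str.len s) with
    | none =>
      exact absurd ((PySem.List.max?_eq_none_iff _ _).mp hmx)
        (fun h => by rw [h] at hcmem; exact absurd hcmem List.not_mem_nil)
    | some s0 =>
      obtain ⟨l0, hl0F, rfl⟩ := (hmem s0).mp (PySem.List.max?_mem hmx)
      have hisMax := PySem.List.max?_isMax hmx _ hcmem
      rw [hlen L (hFle L hLF), hlen l0 (hFle l0 hl0F)] at hisMax
      have h1 : L ≤ l0 := by exact_mod_cast hisMax
      have h2 : l0 ≤ L := hmax l0 hl0F
      have hEq : l0 = L := by omega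
      subst hEq
      simp only [Option.map_some]
      congr 1
      apply String.toList_inj.mp
      rw [String.toList_append, String.toList_ofList, pvPname, String.toList_ofList]

-- B's longest-matching-stem lookup, for one suffix, also yields the last element of pvF
theorem pv_B_side (keys : List String) (low suf : String) (m : Nat)
    (hsuf : suf.toList.length = m) (hm : 0 < m) :
    (pvB_best (PySem.Set.ofList (pvStemList keys suf (m : Int))) low).map (· ++ suf)
    = ((pvF keys low suf low.toList.length).getLast?).map (pvPname low suf) := by
  unfold pvB_best
  apply pv_max_char
  · intro s
    rw [List.mem_filter]
    constructor
    · rintro ⟨hs, hp⟩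
      have hst := (pv_stem_mem keys suf m hsuf hm s).mp hs
      simp only [Bool.and_eq_true, decide_eq_true_eq] at hp
      obtain ⟨⟨h0, h1⟩, h2⟩ := hp
      rw [PySem.Str.len_eq] at h0 h1
      rw [PySem.Str.len_eq] at h1
      have h0' : 0 < s.toList.length := by exact_mod_cast h0
      have h1' : s.toList.length < low.toList.length := by exact_mod_cast h1
      have hpre : s.toList <+: low.toList := by
        rw [PySem.Str.startswith_eq] at h2
        exact List.isPrefixOf_iff_prefix.mp h2
      have htake : s.toList = low.toList.take s.toList.length := List.prefix_iff_eq_take.mp hpre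
      refine ⟨s.toList.length, ?_, ?_⟩
      · rw [pvF, List.mem_filter]
        refine ⟨List.mem_range'_1.mpr ⟨h0', by omega⟩, ?_⟩
        show (keys.contains (pvPname low suf s.toList.length)) = true
        have heq : pvPname low suf s.toList.length = String.ofList (s.toList ++ suf.toList) := by
          apply String.toList_inj.mp
          rw [pvPname, String.toList_ofList, String.toList_ofList, ← htake]
        rw [heq]
        exact List.contains_iff_mem.mpr hst
      · apply String.toList_inj.mp
        rw [String.toList_ofList]
        exact htake
    · rintro ⟨l, hlF, rfl⟩
      rw [pvF, List.mem_filter] at hlF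
      obtain ⟨hlr, hQ⟩ := hlF
      obtain ⟨hl1, hl2⟩ := List.mem_range'_1.mp hlr
      have hln : l < low.toList.length := by omega
      have hlen_take : (low.toList.take l).length = l := by rw [List.length_take]; omega
      constructor
      · apply (pv_stem_mem keys suf m hsuf hm _).mpr
        have hpq : pvPname low suf l = String.ofList ((String.ofList (low.toList.take l)).toList ++ suf.toList) := by
          apply String.toList_inj.mp
          rw [pvPname, String.toList_ofList, String.toList_ofList, String.toList_ofList]
        simp only [pvQ] at hQ
        rw [← hpq]
        exact List.contains_iff_mem.mp hQ
      · simp only [Bool.and_eq_true, decide_eq_true_eq]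
        have hlenS : PySem.Str.len (String.ofList (low.toList.take l)) = (l : Int) := by
          rw [PySem.Str.len_eq, String.toList_ofList, hlen_take]
        refine ⟨⟨?_, ?_⟩, ?_⟩
        · rw [hlenS]; exact_mod_cast hl1
        · rw [hlenS, PySem.Str.len_eq]; exact_mod_cast hln
        · rw [PySem.Str.startswith_eq]
          apply List.isPrefixOf_iff_prefix.mpr
          rw [String.toList_ofList]
          exact List.take_prefix _ _
  · exact List.Pairwise.filter _ (List.pairwise_lt_range' ..)
  · intro l hl
    rw [pvF, List.mem_filter] at hl
    have := List.mem_range'_1.mp hl.1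
    omega

-- the per-suffix equivalence of the two scans
theorem pv_flexi_suffix (keys : List String) (column suf : String) (m : Nat)
    (hsuf : suf.toList.length = m) (hm : 0 < m) :
    ((PySem.List.pyRange 1 (PySem.Str.len column)).findSome? (fun i =>
        if keys.contains (PySem.Str.slice (PySem.Str.lower column) none (some (-i)) ++ suf) then
          some (PySem.Str.slice (PySem.Str.lower column) none (some (-i)) ++ suf) else none))
    = (pvB_best (PySem.Set.ofList (pvStemList keys suf (m : Int))) (PySem.Str.lower column)).map (· ++ suf) := by
  have hlen : (PySem.Str.lower column).toList.length = column.toList.length := by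
    rw [PySem.Str.toList_lower]
    simp only [PySem.Chars.lower, List.length_map]
  rw [pv_A_side keys column suf, pv_B_side keys (PySem.Str.lower column) suf m hsuf hm, hlen]

-- pvB_prep's three components, named
theorem pv_prep_go (oed_fields : List (String × List (String × String))) :
    ∀ (d : PySem.Dict String String) (sx sz : PySem.Set String),
    oed_fields.foldl (fun acc p =>
    ((match (PySem.Dict.mk p.2).get? "alias" with
      | some a => if a = "" then acc.1 else acc.1.insert (PySem.Str.lower a) p.1
      | none => acc.1),
     (if PySem.Str.endswith p.1 "xx" then PySem.Set.add acc.2.1 (PySem.Str.slice p.1 none (some (-2))) else acc.2.1),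
     (if PySem.Str.endswith p.1 "zzz" then PySem.Set.add acc.2.2 (PySem.Str.slice p.1 none (some (-3))) else acc.2.2)))
    (d, sx, sz)
    = (oed_fields.foldl (fun d p =>
        match (PySem.Dict.mk p.2).get? "alias" with
        | some a => if a = "" then d else d.insert (PySem.Str.lower a) p.1
        | none => d) d,
       PySem.Set.update sx (pvStemList (oed_fields.map Prod.fst) "xx" 2),
       PySem.Set.update sz (pvStemList (oed_fields.map Prod.fst) "zzz" 3)) := by
  induction oed_fields with
  | nil => intro d sx sz; rfl
  | cons p t ih =>
    intro d sx sz
    simp only [List.foldl_cons, ih, pvStemList, List.map_cons, List.filter_cons]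
    by_cases hx : PySem.Str.endswith p.1 "xx" <;>
      by_cases hz : PySem.Str.endswith p.1 "zzz" <;>
        simp only [hx, hz, if_true, if_false, Bool.false_eq_true, List.map_cons] <;>
          simp [PySem.Set.update]

theorem pv_prep_eq (oed_fields : List (String × List (String × String))) :
    pvB_prep oed_fields =
      (pvA_aliases oed_fields,
       PySem.Set.ofList (pvStemList (oed_fields.map Prod.fst) "xx" 2),
       PySem.Set.ofList (pvStemList (oed_fields.map Prod.fst) "zzz" 3)) := by
  rw [pvB_prep, pv_prep_go]
  rfl

-- ===== VERDICT (by name: the statement is the Claim_ definition above) =====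
theorem column_to_field_spec : Claim_equal_column_to_field := by
  intro columns oed_fields use_generic_flexi _
  unfold Spec_column_to_field column_to_field column_to_field_alt
  rw [pv_prep_eq]
  simp only []
  apply congrArg PySem.Dict.items
  apply PySem.List.foldl_congr_mem
  intro acc column _
  by_cases hc : (oed_fields.map Prod.fst).contains (PySem.Str.lower column)
  · rw [if_pos hc, if_pos hc]
  · simp only [hc, if_false, Bool.false_eq_true]
    cases (pvA_aliases oed_fields).get? (PySem.Str.lower column) with
    | some f => rfl
    | none =>
      have hx := pv_flexi_suffix (oed_fields.map Prod.fst) column "xx" 2 rfl (by norm_num)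
      have hz := pv_flexi_suffix (oed_fields.map Prod.fst) column "zzz" 3 rfl (by norm_num)
      have h2 : ((2:Nat):Int) = (2:Int) := by norm_num
      have h3 : ((3:Nat):Int) = (3:Int) := by norm_num
      rw [h2] at hx
      rw [h3] at hz
      simp only [pvA_flexi, List.findSome?_cons, List.findSome?_nil]
      rw [hx, hz]
      cases pvB_best (PySem.Set.ofList (pvStemList (oed_fields.map Prod.fst) "xx" 2)) (PySem.Str.lower column) with
      | some s => rfl
      | none =>
        cases pvB_best (PySem.Set.ofList (pvStemList (oed_fields.map Prod.fst) "zzz" 3)) (PySem.Str.lower column) with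
        | some s => rfl
        | none => rfl
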